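-- pv_equiv track=rewrite | github.com/ColgateLeoAscenzi/COMPUTERSCIENCE101 | HOMEWORK/hw5.py | slice67
-- ===== SOURCE A (Python) =====
-- def slice67(L):
--     '''(L) -> (L)
--     Takes a list L and removes the
--     numbers between 3 and 4
--     including 3 and 4 themselves
--     assumes every 3 has at least
--     one four following it
--     >>> slice67([4,3,4])
--     [4]
--     >>> slice67([7,3,1,3,1,4,1,4,10])
--     [7, 1, 4, 10]
--     >>> slice67([3,1,4,4,2,3,4])
--     [4, 2]
--     '''
--     #New list
--     L2 = []
--     #Starts out looking for a 3 but not a 4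
--     lookfor3 = True
--     lookfor4 = False
--     #Loops over the indexes in L
--     for i in range(len(L)):
--         #Handles 3 logic, essentially if it's looking for a 3 and finds ones
--         #it starts to cut and look for the ending 4. If it's looking for a 3
--         #but doesn't find one, it adds that to the L2
--         if L[i] == 3 and lookfor3:
--             lookfor3 = False
--             lookfor4 = True
--         elif L[i] != 3 and lookfor3:
--             L2+= [L[i]]
--
--         #Handles 4 logic, if it's looking for the 4 then it wont add to L2
--         #Unless it finds the 4, the it will look for another 3, but wont
--         #add the 4 to the list. And if it's not looking for a 4 but finds
--         #a 4 it adds that to the list as that 4 is seperate from the 3-4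
--         #section
--         elif L[i] == 4 and lookfor4:
--             lookfor3 = True
--             lookfor4 = False
--         elif L[i] == 4 and not lookfor4:
--             L2 += [L[i]]
--         elif L[i] != 4 and lookfor4:
--             pass
--
--         #Just incase
--         else:
--             L2 += [L[i]]
--
--     return L2
-- ===== SOURCE B (Python) =====
-- def slice67(L):
--     it = iter(L)
--     result = []
--     for x in it:
--         if x == 3:
--             for y in it:
--                 if y == 4:
--                     break
--         else:
--             result.append(x)
--     return result
-- ===== Notes on version B (the rewrite author's own statement) =====
-- stated objective: simpler
-- what changed: Replaces the flag-pair state machine over indices with an iterator-driven outer loop that, on seeing a 3, consumes the section up to its terminating 4 with an inner loop; no flags, no indexing.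
import Mathlib
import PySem

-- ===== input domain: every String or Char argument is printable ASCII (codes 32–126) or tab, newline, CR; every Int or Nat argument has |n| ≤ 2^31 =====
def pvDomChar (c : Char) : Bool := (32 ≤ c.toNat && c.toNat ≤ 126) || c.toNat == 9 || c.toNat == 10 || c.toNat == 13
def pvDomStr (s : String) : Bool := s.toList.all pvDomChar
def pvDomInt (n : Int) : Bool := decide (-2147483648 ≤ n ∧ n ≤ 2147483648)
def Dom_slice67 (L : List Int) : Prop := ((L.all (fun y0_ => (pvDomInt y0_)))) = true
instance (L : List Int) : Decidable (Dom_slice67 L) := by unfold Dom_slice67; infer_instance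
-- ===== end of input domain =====

-- B is a simpler decomposition: an outer loop that, on a 3, hands control to an inner
-- consumer discarding up to and including the terminating 4; A's flag state machine is removed.

-- ===== PORT A =====
-- step of A's loop body on state (L2, lookfor3, lookfor4); branches in A's order
def slice67Step (s : List Int × Bool × Bool) (x : Int) : List Int × Bool × Bool :=
  let (L2, lookfor3, lookfor4) := s
  if x == 3 && lookfor3 then (L2, false, true)
  else if x != 3 && lookfor3 then (L2 ++ [x], lookfor3, lookfor4)
  else if x == 4 && lookfor4 then (L2, true, false)
  else if x == 4 && !lookfor4 then (L2 ++ [x], lookfor3, lookfor4)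
  else if x != 4 && lookfor4 then (L2, lookfor3, lookfor4)
  else (L2 ++ [x], lookfor3, lookfor4)

def slice67 (L : List Int) : List Int :=
  (L.foldl slice67Step ([], true, false)).1

-- ===== PORT B =====
-- inner loop: consume elements up to and including the first 4, return the rest
def consumeTo4 : List Int → List Int
  | [] => []
  | y :: rest => if y == 4 then rest else consumeTo4 rest

theorem consumeTo4_length_le : ∀ (l : List Int), (consumeTo4 l).length ≤ l.length
  | [] => Nat.le_refl _
  | y :: rest => by
      simp only [consumeTo4]
      split
      · exact Nat.le_succ _
      · exact Nat.le_trans (consumeTo4_length_le rest) (Nat.le_succ _)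

def slice67_alt : List Int → List Int
  | [] => []
  | x :: rest =>
      if x == 3 then slice67_alt (consumeTo4 rest)
      else x :: slice67_alt rest
termination_by l => l.length
decreasing_by
  · exact Nat.lt_succ_of_le (consumeTo4_length_le rest)
  · exact Nat.lt_succ_of_le (Nat.le_refl _)

-- ===== PRECONDITION & SPEC =====
def Spec_slice67 (L : List Int) (out : List Int) : Prop := out = slice67_alt L
instance (L : List Int) (out : List Int) : Decidable (Spec_slice67 L out) := by unfold Spec_slice67; infer_instance

-- ===== CLAIM (what is proved, stated in full; the proofs are below) =====
def Claim_equal_slice67 : Prop := ∀ (L : List Int), Dom_slice67 L → Spec_slice67 L (slice67 L)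

-- ===== LEMMAS AND PROOFS =====
-- Invariant: from 'seeking' state the fold yields acc ++ B L; from 'skipping' state it
-- yields acc ++ B (consumeTo4 L).  Proved jointly by induction on L.
theorem slice67_fold_inv : ∀ (L : List Int) (acc : List Int),
    (L.foldl slice67Step (acc, true, false)).1 = acc ++ slice67_alt L ∧
    (L.foldl slice67Step (acc, false, true)).1 = acc ++ slice67_alt (consumeTo4 L)
  | [], acc => by simp [slice67_alt, consumeTo4]
  | x :: rest, acc => by
      constructor
      · by_cases h3 : x = 3
        · subst h3
          simpa [List.foldl, slice67Step, slice67_alt] using (slice67_fold_inv rest acc).2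
        · have : (x != 3) = true := by simp [h3]
          simp only [List.foldl, slice67Step, this]
          simpa [slice67_alt, h3] using (slice67_fold_inv rest (acc ++ [x])).1
      · by_cases h4 : x = 4
        · subst h4
          simpa [List.foldl, slice67Step, consumeTo4] using (slice67_fold_inv rest acc).1
        · have : (x != 4) = true := by simp [h4]
          simp only [List.foldl, slice67Step, this]
          simpa [consumeTo4, h4] using (slice67_fold_inv rest acc).2

-- ===== VERDICT (by name: the statement is the Claim_ definition above) =====
theorem slice67_spec : Claim_equal_slice67 := by
  intro L _
  unfold Spec_slice67 slice67
  simpa using (slice67_fold_inv L []).1
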